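-- pv_equiv track=rewrite | github.com/dsparber/advent-of-code | 2022/07/solution.py | solve
-- ===== SOURCE A (Python) =====
-- from typing import Iterable
--
-- dir_sizes = list()
--
-- def parse_commands(input_data: str) -> dict:
--     root = dict(children=dict())
--     current = root
--     for line in input_data.split("\n"):
--         match line.split(" "):
--             case ["$", "cd", "/"]:
--                 current = root
--             case ["$", "cd", ".."]:
--                 current = current['parent']
--             case ["$", "cd", name]:
--                 current = current['children'][name]
--             case ["$", "ls"]:
--                 pass
--             case ["dir", name]:
--                 current['children'][name] = dict(parent=current, children=dict())
--             case [size, name]: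
--                 current['children'][name] = int(size)
--     return root
--
-- def calculate_size(dir: dict) -> int:
--     match dir:
--         case {'children': children}:
--             dir_size = sum(map(calculate_size, children.values()))
--             dir_sizes.append(dir_size)
--             return dir_size
--         case size:
--             return size
--
-- def solve(input_data: str) -> Iterable[int]:
--     root = parse_commands(input_data)
--     dir_sizes.clear()
--     calculate_size(root)
--     yield sum([size for size in dir_sizes if size <= 100000])
--
--     total_space = 70000000
--     needed_space = 30000000
--     used_space = max(dir_sizes)
--     free_space = total_space - used_space
--     space_to_free = needed_space - free_space
--     yield min([size for size in dir_sizes if size >= space_to_free])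
-- ===== SOURCE B (Python) =====
-- def solve(input_data: str):
--     # one pass: stack of directory names + dict mapping each directory path to its total size
--     sizes = {(): 0}
--     path = []
--     for line in input_data.split("\n"):
--         parts = line.split(" ")
--         if parts == ["$", "cd", "/"]:
--             path = []
--         elif parts == ["$", "cd", ".."]:
--             path.pop()
--         elif len(parts) == 3 and parts[0] == "$" and parts[1] == "cd":
--             path.append(parts[2])
--         elif parts == ["$", "ls"]:
--             pass
--         elif len(parts) == 2:
--             if parts[0] == "dir":
--                 sizes[tuple(path) + (parts[1],)] = 0
--             else:
--                 size = int(parts[0])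
--                 for i in range(len(path) + 1):
--                     key = tuple(path[:i])
--                     sizes[key] = sizes.get(key, 0) + size
--     values = sizes.values()
--     yield sum(v for v in values if v <= 100000)
--     space_to_free = 30000000 - (70000000 - max(values))
--     yield min(v for v in values if v >= space_to_free)
-- ===== Notes on version B (the rewrite author's own statement) =====
-- stated objective: idiomatic
-- what changed: Replaces the parent-pointer dict tree plus global-list recursive size computation by a single pass that keeps a stack of directory names and a dict from full directory path to accumulated size, adding each file size to every directory on the stack; no tree and no recursion are built.
-- outside the precondition, e.g. on solve('1 a\n1 a'): A returns [1, 1], B returns [2, 2]; on solve('1 a\n$ cd a'): A returns [1, 1], B returns [1, 1]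
import Mathlib
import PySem

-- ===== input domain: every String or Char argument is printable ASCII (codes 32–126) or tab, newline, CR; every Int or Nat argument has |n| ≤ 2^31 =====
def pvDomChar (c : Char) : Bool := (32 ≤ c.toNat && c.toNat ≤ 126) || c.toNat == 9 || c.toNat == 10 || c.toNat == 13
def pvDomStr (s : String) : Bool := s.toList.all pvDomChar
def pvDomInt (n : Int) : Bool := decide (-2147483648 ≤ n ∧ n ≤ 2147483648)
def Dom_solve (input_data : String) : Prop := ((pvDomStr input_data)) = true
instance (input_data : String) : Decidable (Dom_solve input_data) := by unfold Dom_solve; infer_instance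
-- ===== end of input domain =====

-- B re-implements the tree-building/recursive-size A by a single pass with a stack of
-- directory names and a path-keyed size dict (no tree, no recursion); equivalence is
-- proved on well-formed sessions (Pre_solve below).

-- ===== PORT A =====

-- a child entry of a directory node: a subdirectory (by arena index) or a file size
inductive PvEnt : Type
  | dir : Nat → PvEnt
  | file : Int → PvEnt
deriving DecidableEq, Repr

-- a directory node of A's tree: parent pointer (none at the root, whose dict has no
-- 'parent' key) and the 'children' dict; the cyclic parent pointers of A's Python
-- dicts are represented by arena indices into a node list
abbrev PvNode : Type := Option Nat × PySem.Dict String PvEnt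

def pvDfltNode : PvNode := (none, PySem.Dict.mk [])

-- `current` in parse_commands: a directory (arena index) or, after `cd` into a file, an int
-- (A only raises later, when a dict operation hits that int: modelled as `none` then)
def pvSetChild (nodes : List PvNode) (i : Nat) (name : String) (e : PvEnt) : List PvNode :=
  nodes.set i ((nodes.getD i pvDfltNode).1, (nodes.getD i pvDfltNode).2.insert name e)

-- one line of parse_commands' loop; `none` = the Python raised (KeyError/TypeError/ValueError)
def pvStepA (st : Option (List PvNode × PvEnt)) (line : String) : Option (List PvNode × PvEnt) :=
  match st with
  | none => none
  | some (nodes, cur) =>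
    match PySem.Str.split? line " " with
    | none => none
    | some toks =>
      match toks with
      | [a, b, c] =>
        if a = "$" ∧ b = "cd" then
          if c = "/" then some (nodes, .dir 0)
          else if c = ".." then
            match cur with
            | .file _ => none
            | .dir i =>
              match (nodes.getD i pvDfltNode).1 with
              | none => none     -- KeyError: root has no 'parent'
              | some p => some (nodes, .dir p)
          else
            match cur with
            | .file _ => none
            | .dir i =>
              match (nodes.getD i pvDfltNode).2.get? c with
              | none => none     -- KeyError
              | some e => some (nodes, e)
        else some (nodes, cur)
      | [a, b] =>
        if a = "$" ∧ b = "ls" then some (nodes, cur)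
        else if a = "dir" then
          match cur with
          | .file _ => none
          | .dir i => some (pvSetChild nodes i b (.dir nodes.length) ++ [(some i, PySem.Dict.mk [])], cur)
        else
          match PySem.Int.ofStr? a with
          | none => none         -- ValueError from int(size)
          | some v =>
            match cur with
            | .file _ => none
            | .dir i => some (pvSetChild nodes i b (.file v), cur)
      | _ => some (nodes, cur)

mutual
-- sum(map(calculate_size, children.values())) of calculate_size, threading the postorder
-- dir_sizes list; the `bound < j ∧ j < nodes.length` guard only ensures termination
-- (in every arena parse_commands builds, a child's index is fresh, hence above its parent's)
def pvCalcList (nodes : List PvNode) (bound : Nat) (es : List PvEnt) : List Int × Int :=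
  match es with
  | [] => ([], 0)
  | .file v :: t =>
    let r := pvCalcList nodes bound t
    (r.1, v + r.2)
  | .dir j :: t =>
    let c := if h : bound < j ∧ j < nodes.length then pvCalcDir nodes j else ([], 0)
    let r := pvCalcList nodes bound t
    (c.1 ++ r.1, c.2 + r.2)
termination_by (nodes.length - bound, 0, es.length)

-- calculate_size on a directory node: (dir_sizes appended in postorder, its size)
def pvCalcDir (nodes : List PvNode) (i : Nat) : List Int × Int :=
  let r := pvCalcList nodes i ((nodes.getD i pvDfltNode).2.values)
  (r.1 ++ [r.2], r.2)
termination_by (nodes.length - i, 1, 0)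
end

def solve (input_data : String) : List Int :=
  match PySem.Str.split? input_data "\n" with
  | none => []                   -- unreachable: the separator "\n" is nonempty
  | some lines =>
    match lines.foldl pvStepA (some ([(none, PySem.Dict.mk [])], .dir 0)) with
    | none => []                 -- parse_commands raised (outside Pre_solve)
    | some (nodes, _) =>
      let dirSizes := (pvCalcDir nodes 0).1
      let p1 := (dirSizes.filter (fun s => decide (s ≤ 100000))).sum
      match PySem.List.max? dirSizes (fun x => x) with
      | none => []               -- unreachable: dir_sizes contains the root's size
      | some used =>
        let spaceToFree : Int := 30000000 - (70000000 - used)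
        match PySem.List.min? (dirSizes.filter (fun s => decide (spaceToFree ≤ s))) (fun x => x) with
        | none => []             -- unreachable: the root's size itself qualifies
        | some m2 => [p1, m2]

-- ===== PORT B =====

-- one line of B's single pass: stack of directory names + path-keyed size dict;
-- `none` = B's Python raised (IndexError from pop / ValueError from int)
def pvStepB (st : Option (List String × PySem.Dict (List String) Int)) (line : String) :
    Option (List String × PySem.Dict (List String) Int) :=
  match st with
  | none => none
  | some (path, sizes) =>
    match PySem.Str.split? line " " with
    | none => none
    | some toks =>
      match toks with
      | [a, b, c] =>
        if a = "$" ∧ b = "cd" then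
          if c = "/" then some ([], sizes)
          else if c = ".." then
            match path with
            | [] => none         -- IndexError: pop from empty list
            | _ => some (path.dropLast, sizes)
          else some (path ++ [c], sizes)
        else some (path, sizes)
      | [a, b] =>
        if a = "$" ∧ b = "ls" then some (path, sizes)
        else if a = "dir" then some (path, sizes.insert (path ++ [b]) 0)
        else
          match PySem.Int.ofStr? a with
          | none => none         -- ValueError from int(parts[0])
          | some v =>
            some (path, (PySem.List.pyRange 0 ((path.length : Int) + 1) 1).foldl
              (fun d i =>
                let key := PySem.List.slice path none (some i)
                d.insert key (d.getD key 0 + v)) sizes)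
      | _ => some (path, sizes)

def solve_alt (input_data : String) : List Int :=
  match PySem.Str.split? input_data "\n" with
  | none => []
  | some lines =>
    match lines.foldl pvStepB (some ([], (PySem.Dict.mk []).insert ([] : List String) 0)) with
    | none => []                 -- B raised (outside Pre_solve)
    | some (_, sizes) =>
      let vals := sizes.values
      let p1 := (vals.filter (fun v => decide (v ≤ 100000))).sum
      match PySem.List.max? vals (fun x => x) with
      | none => []               -- unreachable: the root entry is always present
      | some used =>
        let spaceToFree : Int := 30000000 - (70000000 - used)
        match PySem.List.min? (vals.filter (fun v => decide (spaceToFree ≤ v))) (fun x => x) with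
        | none => []             -- unreachable: the root's value itself qualifies
        | some m2 => [p1, m2]

-- ===== PRECONDITION & SPEC =====

-- well-formedness of one session line: tracks the directory path, the set of (path, name)
-- entries already listed and the set of declared directory paths; `none` = ill-formed
def pvPreStep (st : Option (List String × List (List String × String) × List (List String)))
    (line : String) :
    Option (List String × List (List String × String) × List (List String)) :=
  match st with
  | none => none
  | some (path, seen, dirs) =>
    match PySem.Str.split? line " " with
    | none => none
    | some toks =>
      match toks with
      | [a, b, c] =>
        if a = "$" ∧ b = "cd" then
          if c = "/" then some ([], seen, dirs)
          else if c = ".." then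
            match path with
            | [] => none                       -- `cd ..` at the root
            | _ => some (path.dropLast, seen, dirs)
          else if (path ++ [c]) ∈ dirs then some (path ++ [c], seen, dirs)
          else none                            -- `cd` into a name not declared as a directory
        else some (path, seen, dirs)
      | [a, b] =>
        if a = "$" ∧ b = "ls" then some (path, seen, dirs)
        else if (path, b) ∈ seen then none     -- duplicate listing of a name in a directory
        else if a = "dir" then some (path, (path, b) :: seen, (path ++ [b]) :: dirs)
        else if (PySem.Int.ofStr? a).isSome then some (path, (path, b) :: seen, dirs)
        else none                              -- size token not an int literal
      | _ => some (path, seen, dirs)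

-- Pre_solve admits exactly the well-formed shell sessions: every `cd` goes to `/`, to `..`
-- above the root, or into a previously declared directory, every size token parses as an
-- int, and no directory lists the same name twice.  This excludes (a) inputs on which A
-- raises (bad `cd`, bad size token, operations after `cd` into a file), and (b) sessions
-- listing a name twice in one directory, where A's silent dict overwrite discards the
-- earlier entry (and any subtree under it) — an accidental corner on which A's and B's
-- answers are both defensible.
def Pre_solve (input_data : String) : Prop :=
  (match PySem.Str.split? input_data "\n" with
   | none => false
   | some lines => (lines.foldl pvPreStep (some ([], [], []))).isSome) = true

instance (input_data : String) : Decidable (Pre_solve input_data) := by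
  unfold Pre_solve; infer_instance

def pvWitness_solve : String := "$ cd /\ndir a\n100 b.txt\n$ cd a\n99999 c.txt"

def Spec_solve (input_data : String) (out : List Int) : Prop := out = solve_alt input_data
instance (input_data : String) (out : List Int) : Decidable (Spec_solve input_data out) := by
  unfold Spec_solve; infer_instance

-- ===== CLAIM (what is proved, stated in full; the proofs are below) =====
def Claim_equal_solve : Prop := ∀ (input_data : String), Dom_solve input_data → Pre_solve input_data → Spec_solve input_data (solve input_data)

-- ===== LEMMAS AND PROOFS =====

-- one record of the session: (directory path it was listed in, name, some size | none = dir)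
abbrev PvRec : Type := List String × String × Option Int

def pvKey (r : PvRec) : List String × String := (r.1, r.2.1)

-- the declared directory paths, in declaration order
def pvD (R : List PvRec) : List (List String) :=
  R.filterMap (fun r => match r.2.2 with | none => some (r.1 ++ [r.2.1]) | some _ => none)

def pvAllD (R : List PvRec) : List (List String) := [] :: pvD R

-- total size of the directory at path p: sum of all file records at or below p
def pvFSum (R : List PvRec) (p : List String) : Int :=
  ((R.filter (fun r => r.2.2.isSome && decide (p <+: r.1))).map (fun r => r.2.2.getD 0)).sum

def pvEntOf (R : List PvRec) (r : PvRec) : PvEnt :=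
  match r.2.2 with
  | some v => .file v
  | none => .dir ((pvAllD R).idxOf (r.1 ++ [r.2.1]))

def pvItems (R : List PvRec) (p : List String) : List (String × PvEnt) :=
  (R.filter (fun r => decide (r.1 = p))).map (fun r => (r.2.1, pvEntOf R r))

-- the coupling invariant between A's arena, B's dict, and the well-formedness state
structure PvInv (R : List PvRec) (nodes : List PvNode) (cur : PvEnt) (pp : List String)
    (seen : List (List String × String)) (dirs : List (List String))
    (sizes : PySem.Dict (List String) Int) : Prop where
  nodup : (pvAllD R).Nodup
  ordered : ∀ j (h : j < (pvD R).length), ((pvD R)[j]).dropLast ∈ [] :: (pvD R).take j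
  recpath : ∀ r ∈ R, r.1 ∈ pvAllD R
  keynodup : (R.map pvKey).Nodup
  seen_eq : ∀ k, k ∈ seen ↔ k ∈ R.map pvKey
  dirs_eq : ∀ p, p ∈ dirs ↔ p ∈ pvD R
  pp_mem : pp ∈ pvAllD R
  len_eq : nodes.length = (pvD R).length + 1
  node_parent : ∀ k, k < (pvAllD R).length →
    (nodes.getD k pvDfltNode).1 =
      if k = 0 then none else some ((pvAllD R).idxOf ((pvAllD R).getD k []).dropLast)
  node_items : ∀ k, k < (pvAllD R).length →
    (nodes.getD k pvDfltNode).2.items = pvItems R ((pvAllD R).getD k [])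
  cur_eq : cur = .dir ((pvAllD R).idxOf pp)
  sizes_eq : sizes.items = (pvAllD R).map (fun p => (p, pvFSum R p))


-- a proper prefix is a prefix of dropLast
theorem pv_prefix_dropLast {q p : List String} (h : q <+: p) (hne : q ≠ p) : q <+: p.dropLast := by
  have hlt : q.length < p.length := by
    rcases Nat.lt_or_ge q.length p.length with h' | h'
    · exact h'
    · exact absurd (List.IsPrefix.eq_of_length h (Nat.le_antisymm h.length_le h')) hne
  have hq : q = p.take q.length := List.prefix_iff_eq_take.mp h
  have : q = (p.dropLast).take q.length := by
    rw [List.dropLast_eq_take, List.take_take]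
    rw [Nat.min_def]; split <;> [exact hq; omega]
  rw [this]; exact List.take_prefix _ _

theorem pv_foldPre_none (lines : List String) : lines.foldl pvPreStep none = none := by
  induction lines with
  | nil => rfl
  | cons l t ih => simpa [pvPreStep] using ih

-- prefix closure of the declared paths
theorem pv_prefix_closed {R nodes cur pp seen dirs sizes} (hI : PvInv R nodes cur pp seen dirs sizes) :
    ∀ p ∈ pvAllD R, ∀ q, q <+: p → q ∈ pvAllD R := by
  have main : ∀ j, ∀ hj : j < (pvD R).length, ∀ q, q <+: (pvD R)[j] → q ∈ pvAllD R := by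
    intro j
    induction j using Nat.strong_induction_on with
    | _ j ih =>
      intro hj q hq
      by_cases he : q = (pvD R)[j]
      · exact he ▸ List.mem_cons_of_mem _ (List.getElem_mem hj)
      · have hq' : q <+: ((pvD R)[j]).dropLast := pv_prefix_dropLast hq he
        have := hI.ordered j hj
        rcases List.mem_cons.mp this with h0 | hmem
        · rw [h0] at hq'
          simp only [List.prefix_nil] at hq'
          exact hq' ▸ List.mem_cons_self
        · rw [List.mem_take_iff_getElem] at hmem
          obtain ⟨i, hi, hieq⟩ := hmem
          exact ih i (by omega) (by omega) q (by
            have : (pvD R)[i]'(by omega) = (pvD R)[j].dropLast := hieq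
            rw [this]; exact hq')
  intro p hp q hq
  rcases List.mem_cons.mp hp with h0 | hD
  · subst h0; simp only [List.prefix_nil] at hq; exact hq ▸ List.mem_cons_self
  · obtain ⟨j, hj, rfl⟩ := List.getElem_of_mem hD
    exact main j hj q hq

-- a child's position in pvAllD is above its parent's
theorem pv_idx_lt {R nodes cur pp seen dirs sizes} (hI : PvInv R nodes cur pp seen dirs sizes) :
    ∀ p nm, p ++ [nm] ∈ pvAllD R → (pvAllD R).idxOf p < (pvAllD R).idxOf (p ++ [nm]) := by
  intro p nm hmem
  rcases List.mem_cons.mp hmem with h0 | hD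
  · exact absurd h0.symm (by simp)
  · obtain ⟨j, hj, hje⟩ := List.getElem_of_mem hD
    have hAll : (pvAllD R)[j+1]'(by simp [pvAllD]; omega) = p ++ [nm] := by
      simpa [pvAllD] using hje
    have hidx2 : (pvAllD R).idxOf (p ++ [nm]) = j + 1 := by
      rw [← hAll]; exact hI.nodup.idxOf_getElem _ _
    have hdrop : ((pvD R)[j]).dropLast = p := by rw [hje]; simp
    have := hI.ordered j hj
    rw [hdrop] at this
    rcases List.mem_cons.mp this with h0 | hmem'
    · rw [hidx2, h0]
      have : (pvAllD R).idxOf ([] : List String) = 0 := by simp [pvAllD]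
      omega
    · rw [List.mem_take_iff_getElem] at hmem'
      obtain ⟨i, hi, hieq⟩ := hmem'
      have hAlli : (pvAllD R)[i+1]'(by simp [pvAllD]; omega) = p := by simpa [pvAllD] using hieq
      have : (pvAllD R).idxOf p = i + 1 := by
        rw [← hAlli]; exact hI.nodup.idxOf_getElem _ _
      omega

-- find? on an association list with distinct names finds the listed pair
theorem pv_find_unique {κ ν : Type} [BEq κ] [LawfulBEq κ] (l : List (κ × ν))
    (hnd : (l.map (fun p => p.1)).Nodup) (x : κ × ν) (hx : x ∈ l) :
    l.find? (fun p => p.1 == x.1) = some x := by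
  induction l with
  | nil => simp at hx
  | cons h t ih =>
    rw [List.find?_cons]
    by_cases he : h.1 = x.1
    · simp only [he, beq_self_eq_true]
      rcases List.mem_cons.mp hx with rfl | hxt
      · rfl
      · exfalso
        have : x.1 ∈ t.map (fun p => p.1) := List.mem_map_of_mem hxt
        rw [← he] at this
        exact (List.nodup_cons.mp hnd).1 this
    · simp only [beq_eq_false_iff_ne.mpr he]
      exact ih (List.nodup_cons.mp hnd).2
        ((List.mem_cons.mp hx).resolve_left (fun h' => he (by rw [h'])))

theorem pv_idxOf_append_self (l : List (List String)) (x : List String) (h : x ∉ l) :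
    (l ++ [x]).idxOf x = l.length := by
  induction l with
  | nil => simp
  | cons c t ih =>
    have hxc : c ≠ x := fun he => h (he ▸ List.mem_cons_self)
    rw [List.cons_append, List.idxOf_cons_ne _ hxc, ih (fun ht => h (List.mem_cons_of_mem _ ht))]
    simp

theorem pv_dict_get? {ν : Type} (L : List (List String)) (f : List String → ν)
    (d : PySem.Dict (List String) ν) (hd : d.items = L.map (fun p => (p, f p)))
    (hnd : L.Nodup) (q : List String) (hq : q ∈ L) : d.get? q = some (f q) := by
  have hnames : (d.items.map (fun p => p.1)).Nodup := by
    rw [hd, List.map_map]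
    change (L.map (fun p => p)).Nodup
    simpa using hnd
  have hmem : (q, f q) ∈ d.items := by
    rw [hd]; exact List.mem_map_of_mem hq
  rw [PySem.Dict.get?, pv_find_unique d.items hnames (q, f q) hmem]
  rfl

theorem pv_dict_getD {ν : Type} [Inhabited ν] (L : List (List String)) (f : List String → ν)
    (d : PySem.Dict (List String) ν) (hd : d.items = L.map (fun p => (p, f p)))
    (hnd : L.Nodup) (q : List String) (hq : q ∈ L) (dflt : ν) : d.getD q dflt = f q := by
  rw [PySem.Dict.getD, pv_dict_get? L f d hd hnd q hq]
  rfl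

theorem pv_dict_contains_true {ν : Type} (L : List (List String)) (f : List String → ν)
    (d : PySem.Dict (List String) ν) (hd : d.items = L.map (fun p => (p, f p)))
    (q : List String) (hq : q ∈ L) : d.contains q = true := by
  rw [PySem.Dict.contains, List.any_eq_true]
  exact ⟨(q, f q), by rw [hd]; exact List.mem_map_of_mem hq, by simp⟩

theorem pv_dict_contains_false {ν : Type} (L : List (List String)) (f : List String → ν)
    (d : PySem.Dict (List String) ν) (hd : d.items = L.map (fun p => (p, f p)))
    (q : List String) (hq : q ∉ L) : d.contains q = false := by
  rw [PySem.Dict.contains]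
  apply List.any_eq_false.mpr
  intro x hx
  rw [hd] at hx
  obtain ⟨p, hp, rfl⟩ := List.mem_map.mp hx
  have hne : p ≠ q := fun he => hq (he ▸ hp)
  simpa using hne

theorem pv_dict_insert_fresh {ν : Type} (L : List (List String)) (f : List String → ν)
    (d : PySem.Dict (List String) ν) (hd : d.items = L.map (fun p => (p, f p)))
    (q : List String) (hq : q ∉ L) (w : ν) :
    (d.insert q w).items = L.map (fun p => (p, f p)) ++ [(q, w)] := by
  rw [PySem.Dict.insert, pv_dict_contains_false L f d hd q hq]
  simp [hd]

theorem pv_dict_insert_present {ν : Type} (L : List (List String)) (f : List String → ν)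
    (d : PySem.Dict (List String) ν) (hd : d.items = L.map (fun p => (p, f p)))
    (q : List String) (hq : q ∈ L) (w : ν) :
    (d.insert q w).items = L.map (fun p => (p, if p = q then w else f p)) := by
  rw [PySem.Dict.insert, pv_dict_contains_true L f d hd q hq]
  simp only [if_true, hd, List.map_map]
  apply List.map_congr_left
  intro p _
  by_cases hpq : p = q
  · subst hpq; simp
  · simp [hpq]

-- adding v at each of a list of distinct, present keys bumps exactly those values
theorem pv_dict_bump (v : Int) : ∀ (keys : List (List String)) (L : List (List String))
    (f : List String → Int) (d : PySem.Dict (List String) Int), keys.Nodup →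
    (∀ q ∈ keys, q ∈ L) → L.Nodup → d.items = L.map (fun p => (p, f p)) →
    (keys.foldl (fun d q => d.insert q (d.getD q 0 + v)) d).items =
      L.map (fun p => (p, f p + if p ∈ keys then v else 0)) := by
  intro keys
  induction keys with
  | nil =>
    intro L f d _ _ _ hd
    simpa using hd
  | cons q ks ih =>
    intro L f d hnd hsub hL hd
    rw [List.foldl_cons]
    have hqL : q ∈ L := hsub q List.mem_cons_self
    have hget : d.getD q 0 = f q := pv_dict_getD L f d hd hL q hqL 0
    have hins : (d.insert q (d.getD q 0 + v)).items =
        L.map (fun p => (p, if p = q then f q + v else f p)) := by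
      rw [hget]
      exact pv_dict_insert_present L f d hd q hqL _
    have := ih L (fun p => if p = q then f q + v else f p) _ (List.nodup_cons.mp hnd).2
      (fun q' hq' => hsub q' (List.mem_cons_of_mem _ hq')) hL hins
    rw [this]
    apply List.map_congr_left
    intro p _
    by_cases hpq : p = q
    · subst hpq
      have : p ∉ ks := (List.nodup_cons.mp hnd).1
      simp [this]
    · simp [hpq, List.mem_cons]

def pvPrefixes (pp : List String) : List (List String) :=
  (List.range (pp.length + 1)).map (fun k => pp.take k)

theorem pv_mem_prefixes (pp q : List String) : q ∈ pvPrefixes pp ↔ q <+: pp := by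
  constructor
  · intro h
    obtain ⟨k, _, rfl⟩ := List.mem_map.mp h
    exact List.take_prefix _ _
  · intro h
    apply List.mem_map.mpr
    refine ⟨q.length, List.mem_range.mpr (by have := h.length_le; omega), ?_⟩
    exact (List.prefix_iff_eq_take.mp h).symm

theorem pv_prefixes_nodup (pp : List String) : (pvPrefixes pp).Nodup := by
  apply List.Nodup.map_on _ (List.nodup_range)
  intro k hk k' hk' he
  have h1 : (pp.take k).length = k := by
    rw [List.length_take]; simp at hk; omega
  have h2 : (pp.take k').length = k' := by
    rw [List.length_take]; simp at hk'; omega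
  rw [← h1, ← h2, he]

-- B's range/slice loop is the fold over the prefixes of the current path
theorem pv_foldB_range (pp : List String) (v : Int) (d : PySem.Dict (List String) Int) :
    (PySem.List.pyRange 0 ((pp.length : Int) + 1) 1).foldl
      (fun d i =>
        let key := PySem.List.slice pp none (some i)
        d.insert key (d.getD key 0 + v)) d =
    (pvPrefixes pp).foldl (fun d q => d.insert q (d.getD q 0 + v)) d := by
  rw [PySem.List.pyRange_one]
  have h1 : (((pp.length : Int) + 1) - 0).toNat = pp.length + 1 := by omega
  rw [h1, List.foldl_map, pvPrefixes, List.foldl_map]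
  have hfn : (fun (d' : PySem.Dict (List String) Int) (k : Nat) =>
      (fun d i =>
        let key := PySem.List.slice pp none (some i)
        d.insert key (d.getD key 0 + v)) d' ((fun k : Nat => (0 : Int) + k) k)) =
      fun (d' : PySem.Dict (List String) Int) (k : Nat) =>
        (fun d q => d.insert q (d.getD q 0 + v)) d' ((fun k => pp.take k) k) := by
    funext d' k
    simp only [zero_add]
    rw [PySem.List.slice_to_natCast]
  rw [hfn]

-- pvAllD, pvFSum and pvEntOf under appending one record
theorem pv_allD_append (R : List PvRec) (r : PvRec) :
    pvAllD (R ++ [r]) = pvAllD R ++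
      (match r.2.2 with | none => [r.1 ++ [r.2.1]] | some _ => []) := by
  rcases hv : r.2.2 with _ | v <;> simp [pvAllD, pvD, List.filterMap_append, hv]

theorem pv_fsum_append (R : List PvRec) (r : PvRec) (p : List String) :
    pvFSum (R ++ [r]) p = pvFSum R p +
      (match r.2.2 with
       | some v => if p <+: r.1 then v else 0
       | none => 0) := by
  rcases hv : r.2.2 with _ | v
  · simp [pvFSum, List.filter_append, hv]
  · by_cases hp : p <+: r.1 <;>
      simp [pvFSum, List.filter_append, List.sum_append, hv, hp]

theorem pv_entOf_append (R : List PvRec) (rec r : PvRec)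
    (h : r.2.2 = none → r.1 ++ [r.2.1] ∈ pvAllD R) :
    pvEntOf (R ++ [rec]) r = pvEntOf R r := by
  rcases hv : r.2.2 with _ | v
  · simp only [pvEntOf, hv]
    rw [pv_allD_append]
    rcases rec.2.2 with _ | w
    · rw [List.idxOf_append_of_mem (h hv)]
    · simp
  · simp [pvEntOf, hv]

-- getD through set and append on the node arena
theorem pv_getD_set_self {α : Type} (nodes : List α) (i : Nat) (hi : i < nodes.length) (x : α)
    (dflt : α) : (nodes.set i x).getD i dflt = x := by
  rw [List.getD_eq_getElem _ _ (by simpa using hi)]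
  simp

theorem pv_getD_set_ne {α : Type} (nodes : List α) (i k : Nat) (hne : k ≠ i) (x : α)
    (dflt : α) : (nodes.set i x).getD k dflt = nodes.getD k dflt := by
  rcases Nat.lt_or_ge k nodes.length with hk | hk
  · rw [List.getD_eq_getElem _ _ (by simpa using hk), List.getD_eq_getElem _ _ hk]
    rw [List.getElem_set_ne (by omega)]
  · rw [List.getD_eq_default _ _ (by simpa using hk), List.getD_eq_default _ _ (by simpa using hk)]

theorem pv_getD_append_left {α : Type} (nodes : List α) (x : α) (k : Nat)
    (hk : k < nodes.length) (dflt : α) : (nodes ++ [x]).getD k dflt = nodes.getD k dflt := by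
  rw [List.getD_eq_getElem _ _ (by simp; omega), List.getD_eq_getElem _ _ hk]
  exact List.getElem_append_left _

theorem pv_getD_append_last {α : Type} (nodes : List α) (x : α) (dflt : α) :
    (nodes ++ [x]).getD nodes.length dflt = x := by
  rw [List.getD_eq_getElem _ _ (by simp)]
  simp

theorem pv_dict_insert_fresh' {κ ν : Type} [BEq κ] [LawfulBEq κ] (d : PySem.Dict κ ν)
    (k : κ) (hk : ∀ p ∈ d.items, p.1 ≠ k) (w : ν) :
    (d.insert k w).items = d.items ++ [(k, w)] := by
  have hc : d.contains k = false := by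
    rw [PySem.Dict.contains]
    apply List.any_eq_false.mpr
    intro x hx
    simpa using hk x hx
  rw [PySem.Dict.insert, hc]
  simp

theorem pv_items_names_nodup {R : List PvRec} (hkey : (R.map pvKey).Nodup) (p : List String) :
    ((pvItems R p).map (fun x => x.1)).Nodup := by
  have hsub : ((R.filter (fun r => decide (r.1 = p))).map pvKey).Sublist (R.map pvKey) :=
    List.Sublist.map pvKey List.filter_sublist
  have hnd := hkey.sublist hsub
  have hrw : (pvItems R p).map (fun x => x.1) =
      ((R.filter (fun r => decide (r.1 = p))).map pvKey).map (fun k => k.2) := by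
    simp [pvItems, List.map_map, pvKey]
  rw [hrw]
  apply hnd.map_on
  intro x hx y hy hxy
  simp only [List.mem_map, List.mem_filter] at hx hy
  obtain ⟨r, ⟨_, hr⟩, rfl⟩ := hx
  obtain ⟨r', ⟨_, hr'⟩, rfl⟩ := hy
  simp only [decide_eq_true_eq] at hr hr'
  simp only [pvKey] at hxy ⊢
  simp [Prod.ext_iff, hr, hr', hxy]

-- basic facts about the current position
theorem pv_getD_idx {R nodes cur pp seen dirs sizes} (hI : PvInv R nodes cur pp seen dirs sizes) :
    (pvAllD R).getD ((pvAllD R).idxOf pp) [] = pp := by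
  rw [List.getD_eq_getElem _ _ (List.idxOf_lt_length_of_mem hI.pp_mem)]
  exact List.getElem_idxOf _

-- `cd /`
theorem pv_inv_cdroot {R nodes cur pp seen dirs sizes} (hI : PvInv R nodes cur pp seen dirs sizes) :
    PvInv R nodes (.dir 0) [] seen dirs sizes :=
  { hI with
    pp_mem := List.mem_cons_self
    cur_eq := by simp [pvAllD] }

-- `cd ..`
theorem pv_parent_some {R nodes cur pp seen dirs sizes} (hI : PvInv R nodes cur pp seen dirs sizes)
    (hpp : pp ≠ []) :
    (nodes.getD ((pvAllD R).idxOf pp) pvDfltNode).1 = some ((pvAllD R).idxOf pp.dropLast) := by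
  have hi := List.idxOf_lt_length_of_mem hI.pp_mem
  have h0 : (pvAllD R).idxOf pp ≠ 0 := by
    intro h
    apply hpp
    have := pv_getD_idx hI
    rw [h] at this
    simpa [pvAllD] using this.symm
  rw [hI.node_parent _ hi, if_neg h0, pv_getD_idx hI]

theorem pv_inv_cdup {R nodes cur pp seen dirs sizes} (hI : PvInv R nodes cur pp seen dirs sizes) :
    PvInv R nodes (.dir ((pvAllD R).idxOf pp.dropLast)) pp.dropLast seen dirs sizes :=
  { hI with
    pp_mem := pv_prefix_closed hI pp hI.pp_mem _ (List.dropLast_prefix pp)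
    cur_eq := rfl }

-- `cd name`
theorem pv_get_child {R nodes cur pp seen dirs sizes} (hI : PvInv R nodes cur pp seen dirs sizes)
    (c : String) (hc : pp ++ [c] ∈ pvD R) :
    (nodes.getD ((pvAllD R).idxOf pp) pvDfltNode).2.get? c =
      some (.dir ((pvAllD R).idxOf (pp ++ [c]))) := by
  have hi := List.idxOf_lt_length_of_mem hI.pp_mem
  have hitems := hI.node_items _ hi
  rw [pv_getD_idx hI] at hitems
  simp only [pvD, List.mem_filterMap] at hc
  obtain ⟨r0, hr0R, hr0⟩ := hc
  rcases hv : r0.2.2 with _ | w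
  swap
  · rw [hv] at hr0; simp at hr0
  rw [hv] at hr0
  simp only [Option.some.injEq] at hr0
  have hr01 : r0.1 = pp := by
    have := congrArg List.dropLast hr0
    simpa using this
  have hr0n : r0.2.1 = c := by
    rw [hr01] at hr0
    have := List.append_cancel_left hr0
    simpa using this
  have hmem : (c, pvEntOf R r0) ∈ (nodes.getD ((pvAllD R).idxOf pp) pvDfltNode).2.items := by
    rw [hitems]
    simp only [pvItems, List.mem_map]
    exact ⟨r0, List.mem_filter.mpr ⟨hr0R, by simp [hr01]⟩, by rw [hr0n]⟩
  have hnames : ((nodes.getD ((pvAllD R).idxOf pp) pvDfltNode).2.items.map (fun x => x.1)).Nodup := by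
    rw [hitems]
    exact pv_items_names_nodup hI.keynodup pp
  rw [PySem.Dict.get?]
  rw [pv_find_unique _ hnames (c, pvEntOf R r0) hmem]
  simp [pvEntOf, hv, hr01, hr0n]

theorem pv_inv_cdname {R nodes cur pp seen dirs sizes} (hI : PvInv R nodes cur pp seen dirs sizes)
    (c : String) (hc : pp ++ [c] ∈ pvD R) :
    PvInv R nodes (.dir ((pvAllD R).idxOf (pp ++ [c]))) (pp ++ [c]) seen dirs sizes :=
  { hI with
    pp_mem := List.mem_cons_of_mem _ hc
    cur_eq := rfl }

theorem pv_key_fresh {R nodes cur pp seen dirs sizes} (hI : PvInv R nodes cur pp seen dirs sizes)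
    (b : String) (hseen : (pp, b) ∉ seen) : (pp, b) ∉ R.map pvKey :=
  fun h => hseen ((hI.seen_eq _).mpr h)

theorem pv_dirpath_fresh {R nodes cur pp seen dirs sizes} (hI : PvInv R nodes cur pp seen dirs sizes)
    (b : String) (hkeyb : (pp, b) ∉ R.map pvKey) : pp ++ [b] ∉ pvAllD R := by
  intro hmem
  rcases List.mem_cons.mp hmem with h | h
  · simp at h
  · simp only [pvD, List.mem_filterMap] at h
    obtain ⟨r0, hr0R, hr0⟩ := h
    rcases hv : r0.2.2 with _ | w
    swap
    · rw [hv] at hr0; simp at hr0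
    rw [hv] at hr0
    simp only [Option.some.injEq] at hr0
    have hr01 : r0.1 = pp := by
      have := congrArg List.dropLast hr0
      simpa using this
    have hr0n : r0.2.1 = b := by
      rw [hr01] at hr0
      have := List.append_cancel_left hr0
      simpa using this
    apply hkeyb
    have : pvKey r0 = (pp, b) := by simp [pvKey, hr01, hr0n]
    rw [← this]
    exact List.mem_map_of_mem hr0R

-- dropLast of any non-root declared path is declared
theorem pv_dropLast_mem {R nodes cur pp seen dirs sizes} (hI : PvInv R nodes cur pp seen dirs sizes) :
    ∀ k, k < (pvAllD R).length → k ≠ 0 → ((pvAllD R).getD k []).dropLast ∈ pvAllD R := by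
  intro k hk h0
  obtain ⟨j, rfl⟩ : ∃ j, k = j + 1 := ⟨k - 1, by omega⟩
  have hj : j < (pvD R).length := by
    simp only [pvAllD, List.length_cons] at hk
    omega
  have hgd : (pvAllD R).getD (j + 1) [] = (pvD R)[j] := by
    simp only [pvAllD, List.getD_cons_succ]
    exact List.getD_eq_getElem _ _ hj
  rw [hgd]
  rcases List.mem_cons.mp (hI.ordered j hj) with h | h
  · rw [h]; exact List.mem_cons_self
  · exact List.mem_cons_of_mem _ (List.mem_of_mem_take h)

-- `dir name`: the new-directory construction
theorem pv_inv_dir {R nodes cur pp seen dirs sizes} (hI : PvInv R nodes cur pp seen dirs sizes)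
    (b : String) (hseen : (pp, b) ∉ seen) :
    PvInv (R ++ [(pp, b, none)])
      (pvSetChild nodes ((pvAllD R).idxOf pp) b (.dir nodes.length) ++
        [(some ((pvAllD R).idxOf pp), PySem.Dict.mk [])])
      cur pp ((pp, b) :: seen) ((pp ++ [b]) :: dirs) (sizes.insert (pp ++ [b]) 0) := by
  have hkeyb := pv_key_fresh hI b hseen
  have hq'new := pv_dirpath_fresh hI b hkeyb
  have hclosed := pv_prefix_closed hI
  have hi : (pvAllD R).idxOf pp < (pvAllD R).length := List.idxOf_lt_length_of_mem hI.pp_mem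
  have hlen0 : nodes.length = (pvAllD R).length := by simp [pvAllD, hI.len_eq]
  have hD' : pvD (R ++ [(pp, b, none)]) = pvD R ++ [pp ++ [b]] := by
    simp [pvD, List.filterMap_append]
  have hallD' : pvAllD (R ++ [(pp, b, none)]) = pvAllD R ++ [pp ++ [b]] := by
    simp [pvAllD, hD']
  have hstab : ∀ x ∈ pvAllD R,
      (pvAllD (R ++ [(pp, b, none)])).idxOf x = (pvAllD R).idxOf x := by
    intro x hx
    rw [hallD']
    exact List.idxOf_append_of_mem hx
  have hidxq' : (pvAllD (R ++ [(pp, b, none)])).idxOf (pp ++ [b]) = (pvAllD R).length := by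
    rw [hallD']
    exact pv_idxOf_append_self _ _ hq'new
  have hEstab : ∀ r ∈ R, pvEntOf (R ++ [(pp, b, none)]) r = pvEntOf R r := by
    intro r hr
    apply pv_entOf_append
    intro hv
    apply List.mem_cons_of_mem
    simp only [pvD, List.mem_filterMap]
    exact ⟨r, hr, by rw [hv]⟩
  have hitems_stab : ∀ p, p ≠ pp → pvItems (R ++ [(pp, b, none)]) p = pvItems R p := by
    intro p hne
    simp only [pvItems, List.filter_append]
    have : List.filter (fun r : PvRec => decide (r.1 = p)) [(pp, b, none)] = [] := by
      simp [(Ne.symm hne)]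
    rw [this, List.append_nil]
    apply List.map_congr_left
    intro r hr
    rw [hEstab r (List.mem_filter.mp hr).1]
  have hitems_pp : pvItems (R ++ [(pp, b, none)]) pp =
      pvItems R pp ++ [(b, .dir ((pvAllD R).length))] := by
    simp only [pvItems, List.filter_append]
    have h2 : List.filter (fun r : PvRec => decide (r.1 = pp)) [(pp, b, none)] = [(pp, b, none)] := by
      simp
    rw [h2, List.map_append]
    congr 1
    · apply List.map_congr_left
      intro r hr
      rw [hEstab r (List.mem_filter.mp hr).1]
    · simp only [List.map_cons, List.map_nil]
      congr 2
      simp only [pvEntOf]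
      rw [hidxq']
  have hfst : ∀ k, k < nodes.length →
      (((pvSetChild nodes ((pvAllD R).idxOf pp) b (.dir nodes.length)) ++
        [(some ((pvAllD R).idxOf pp), PySem.Dict.mk [])]).getD k pvDfltNode).1 =
        (nodes.getD k pvDfltNode).1 := by
    intro k hk
    rw [pv_getD_append_left _ _ _ (by simpa [pvSetChild] using hk)]
    by_cases hki : k = (pvAllD R).idxOf pp
    · subst hki
      rw [pvSetChild, pv_getD_set_self _ _ (by omega)]
    · rw [pvSetChild, pv_getD_set_ne _ _ _ hki]
  have hbfresh : ∀ x ∈ (nodes.getD ((pvAllD R).idxOf pp) pvDfltNode).2.items, x.1 ≠ b := by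
    intro x hx he
    rw [hI.node_items _ hi, pv_getD_idx hI] at hx
    simp only [pvItems, List.mem_map] at hx
    obtain ⟨r, hrf, rfl⟩ := hx
    have hrR := (List.mem_filter.mp hrf).1
    have hr1 : r.1 = pp := by simpa using (List.mem_filter.mp hrf).2
    have he' : r.2.1 = b := he
    apply hkeyb
    have : pvKey r = (pp, b) := by simp [pvKey, hr1, he']
    rw [← this]
    exact List.mem_map_of_mem hrR
  constructor
  case nodup =>
    rw [hallD', List.nodup_append]
    refine ⟨hI.nodup, by simp, ?_⟩
    intro a ha c hc
    have hc' : c = pp ++ [b] := by simpa using hc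
    subst hc'
    exact fun he => hq'new (he ▸ ha)
  case ordered =>
    intro j hj
    simp only [hD'] at hj ⊢
    simp only [List.length_append, List.length_cons, List.length_nil] at hj
    by_cases hjD : j < (pvD R).length
    · rw [List.getElem_append_left hjD, List.take_append_of_le_length (by omega)]
      exact hI.ordered j hjD
    · have hj' : j = (pvD R).length := by omega
      subst hj'
      rw [List.getElem_append_right (by omega)]
      simp only [Nat.sub_self, List.getElem_cons_zero, List.dropLast_concat]
      rw [List.take_append_of_le_length (by omega), List.take_length]
      exact hI.pp_mem
  case recpath =>
    intro r hr
    rw [hallD']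
    rcases List.mem_append.mp hr with h | h
    · exact List.mem_append_left _ (hI.recpath r h)
    · simp only [List.mem_singleton] at h
      subst h
      exact List.mem_append_left _ hI.pp_mem
  case keynodup =>
    rw [List.map_append, List.nodup_append]
    refine ⟨hI.keynodup, by simp, ?_⟩
    simp only [List.map_cons, List.map_nil]
    intro x hx y hy
    have hy' : y = (pp, b) := by simpa using hy
    subst hy'
    exact fun he => hkeyb (he ▸ hx)
  case seen_eq =>
    intro k
    simp only [List.mem_cons, hI.seen_eq k, List.map_append, List.mem_append, List.map_cons,
      List.map_nil, List.mem_singleton, pvKey]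
    tauto
  case dirs_eq =>
    intro p
    rw [hD']
    simp only [List.mem_cons, hI.dirs_eq p, List.mem_append, List.mem_singleton]
    tauto
  case pp_mem =>
    rw [hallD']
    exact List.mem_append_left _ hI.pp_mem
  case len_eq =>
    simp only [List.length_append, List.length_cons, List.length_nil, pvSetChild,
      List.length_set, hD', hI.len_eq]
  case node_parent =>
    intro k hk
    rw [hallD'] at hk
    simp only [List.length_append, List.length_cons, List.length_nil] at hk
    by_cases hkold : k < (pvAllD R).length
    · rw [hfst k (by omega), hI.node_parent k hkold]
      by_cases hk0 : k = 0
      · simp [hk0]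
      · rw [if_neg hk0, if_neg hk0]
        have hgd : (pvAllD (R ++ [(pp, b, none)])).getD k [] = (pvAllD R).getD k [] := by
          rw [hallD']
          exact pv_getD_append_left _ _ _ hkold _
        rw [hgd, hstab _ (pv_dropLast_mem hI k hkold hk0)]
    · have hk' : k = (pvAllD R).length := by omega
      subst hk'
      have hlen1 : (pvSetChild nodes ((pvAllD R).idxOf pp) b (.dir nodes.length)).length =
          (pvAllD R).length := by simp [pvSetChild, hlen0]
      have hnew : ((pvSetChild nodes ((pvAllD R).idxOf pp) b (.dir nodes.length)) ++
          [(some ((pvAllD R).idxOf pp), PySem.Dict.mk [])]).getD (pvAllD R).length pvDfltNode =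
          (some ((pvAllD R).idxOf pp), PySem.Dict.mk []) := by
        rw [← hlen1]
        exact pv_getD_append_last _ _ _
      rw [hnew, if_neg (by simp [pvAllD])]
      have hgd : (pvAllD (R ++ [(pp, b, none)])).getD (pvAllD R).length [] = pp ++ [b] := by
        rw [hallD']
        exact pv_getD_append_last _ _ _
      rw [hgd]
      simp only [List.dropLast_concat]
      rw [hstab _ hI.pp_mem]
  case node_items =>
    intro k hk
    rw [hallD'] at hk
    simp only [List.length_append, List.length_cons, List.length_nil] at hk
    by_cases hkold : k < (pvAllD R).length
    · have hgd : (pvAllD (R ++ [(pp, b, none)])).getD k [] = (pvAllD R).getD k [] := by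
        rw [hallD']
        exact pv_getD_append_left _ _ _ hkold _
      rw [hgd]
      by_cases hki : k = (pvAllD R).idxOf pp
      · subst hki
        rw [pv_getD_idx hI, hitems_pp]
        have : (((pvSetChild nodes ((pvAllD R).idxOf pp) b (.dir nodes.length)) ++
            [(some ((pvAllD R).idxOf pp), PySem.Dict.mk [])]).getD ((pvAllD R).idxOf pp) pvDfltNode) =
            ((nodes.getD ((pvAllD R).idxOf pp) pvDfltNode).1,
              (nodes.getD ((pvAllD R).idxOf pp) pvDfltNode).2.insert b (.dir nodes.length)) := by
          rw [pv_getD_append_left _ _ _ (by simpa [pvSetChild] using (hlen0 ▸ hi))]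
          rw [pvSetChild, pv_getD_set_self _ _ (hlen0 ▸ hi)]
        rw [this]
        simp only
        rw [pv_dict_insert_fresh' _ _ hbfresh]
        rw [hI.node_items _ hi, pv_getD_idx hI, hlen0]
      · have hne : (pvAllD R).getD k [] ≠ pp := by
          intro he
          apply hki
          rw [← he, List.getD_eq_getElem _ _ hkold]
          exact (hI.nodup.idxOf_getElem _ _).symm
        rw [hitems_stab _ hne]
        have : (((pvSetChild nodes ((pvAllD R).idxOf pp) b (.dir nodes.length)) ++
            [(some ((pvAllD R).idxOf pp), PySem.Dict.mk [])]).getD k pvDfltNode) =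
            nodes.getD k pvDfltNode := by
          rw [pv_getD_append_left _ _ _ (by simp [pvSetChild]; omega)]
          rw [pvSetChild, pv_getD_set_ne _ _ _ hki]
        rw [this]
        exact hI.node_items k hkold
    · have hk' : k = (pvAllD R).length := by omega
      subst hk'
      have hlen1 : (pvSetChild nodes ((pvAllD R).idxOf pp) b (.dir nodes.length)).length =
          (pvAllD R).length := by simp [pvSetChild, hlen0]
      have hnew : ((pvSetChild nodes ((pvAllD R).idxOf pp) b (.dir nodes.length)) ++
          [(some ((pvAllD R).idxOf pp), PySem.Dict.mk [])]).getD (pvAllD R).length pvDfltNode =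
          (some ((pvAllD R).idxOf pp), PySem.Dict.mk []) := by
        rw [← hlen1]
        exact pv_getD_append_last _ _ _
      rw [hnew]
      have hgd : (pvAllD (R ++ [(pp, b, none)])).getD (pvAllD R).length [] = pp ++ [b] := by
        rw [hallD']
        exact pv_getD_append_last _ _ _
      rw [hgd]
      have : pvItems (R ++ [(pp, b, none)]) (pp ++ [b]) = [] := by
        simp only [pvItems, List.filter_append]
        have h1 : List.filter (fun r : PvRec => decide (r.1 = pp ++ [b])) R = [] := by
          apply List.filter_eq_nil_iff.mpr
          intro r hr
          simp only [decide_eq_true_eq]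
          intro he
          exact hq'new (he ▸ hI.recpath r hr)
        have h2 : List.filter (fun r : PvRec => decide (r.1 = pp ++ [b])) [(pp, b, none)] = [] := by
          simp only [List.filter_cons, List.filter_nil]
          have : pp ≠ pp ++ [b] := by
            intro he
            have := congrArg List.length he
            simp at this
          simp [this]
        rw [h1, h2]
        simp
      rw [this]
  case cur_eq =>
    rw [hstab _ hI.pp_mem]
    exact hI.cur_eq
  case sizes_eq =>
    rw [pv_dict_insert_fresh (pvAllD R) (pvFSum R) sizes hI.sizes_eq _ hq'new 0]
    rw [hallD', List.map_append]
    congr 1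
    · apply List.map_congr_left
      intro p _
      rw [pv_fsum_append]
      simp
    · simp only [List.map_cons, List.map_nil]
      congr 2
      rw [pv_fsum_append]
      have : pvFSum R (pp ++ [b]) = 0 := by
        simp only [pvFSum]
        have : List.filter (fun r : PvRec => r.2.2.isSome && decide (pp ++ [b] <+: r.1)) R = [] := by
          apply List.filter_eq_nil_iff.mpr
          intro r hr
          simp only [Bool.and_eq_true, decide_eq_true_eq, not_and]
          intro _ hpre
          exact hq'new (hclosed r.1 (hI.recpath r hr) _ hpre)
        rw [this]
        simp
      simp [this]

-- `<size> name`: the new-file construction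
theorem pv_inv_file {R nodes cur pp seen dirs sizes} (hI : PvInv R nodes cur pp seen dirs sizes)
    (b : String) (v : Int) (hseen : (pp, b) ∉ seen) :
    PvInv (R ++ [(pp, b, some v)])
      (pvSetChild nodes ((pvAllD R).idxOf pp) b (.file v))
      cur pp ((pp, b) :: seen) dirs
      ((pvPrefixes pp).foldl (fun d q => d.insert q (d.getD q 0 + v)) sizes) := by
  have hkeyb := pv_key_fresh hI b hseen
  have hclosed := pv_prefix_closed hI
  have hi : (pvAllD R).idxOf pp < (pvAllD R).length := List.idxOf_lt_length_of_mem hI.pp_mem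
  have hlen0 : nodes.length = (pvAllD R).length := by simp [pvAllD, hI.len_eq]
  have hD' : pvD (R ++ [(pp, b, some v)]) = pvD R := by
    simp [pvD, List.filterMap_append]
  have hallD' : pvAllD (R ++ [(pp, b, some v)]) = pvAllD R := by
    simp [pvAllD, hD']
  have hEstab : ∀ r ∈ R, pvEntOf (R ++ [(pp, b, some v)]) r = pvEntOf R r := by
    intro r hr
    apply pv_entOf_append
    intro hv
    apply List.mem_cons_of_mem
    simp only [pvD, List.mem_filterMap]
    exact ⟨r, hr, by rw [hv]⟩
  have hitems_stab : ∀ p, p ≠ pp → pvItems (R ++ [(pp, b, some v)]) p = pvItems R p := by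
    intro p hne
    simp only [pvItems, List.filter_append]
    have : List.filter (fun r : PvRec => decide (r.1 = p)) [(pp, b, some v)] = [] := by
      simp [(Ne.symm hne)]
    rw [this, List.append_nil]
    apply List.map_congr_left
    intro r hr
    rw [hEstab r (List.mem_filter.mp hr).1]
  have hitems_pp : pvItems (R ++ [(pp, b, some v)]) pp = pvItems R pp ++ [(b, .file v)] := by
    simp only [pvItems, List.filter_append]
    have h2 : List.filter (fun r : PvRec => decide (r.1 = pp)) [(pp, b, some v)] =
        [(pp, b, some v)] := by simp
    rw [h2, List.map_append]
    congr 1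
    apply List.map_congr_left
    intro r hr
    rw [hEstab r (List.mem_filter.mp hr).1]
  have hbfresh : ∀ x ∈ (nodes.getD ((pvAllD R).idxOf pp) pvDfltNode).2.items, x.1 ≠ b := by
    intro x hx he
    rw [hI.node_items _ hi, pv_getD_idx hI] at hx
    simp only [pvItems, List.mem_map] at hx
    obtain ⟨r, hrf, rfl⟩ := hx
    have hrR := (List.mem_filter.mp hrf).1
    have hr1 : r.1 = pp := by simpa using (List.mem_filter.mp hrf).2
    have he' : r.2.1 = b := he
    apply hkeyb
    have : pvKey r = (pp, b) := by simp [pvKey, hr1, he']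
    rw [← this]
    exact List.mem_map_of_mem hrR
  constructor
  case nodup => rw [hallD']; exact hI.nodup
  case ordered =>
    intro j hj
    simp only [hD'] at hj ⊢
    exact hI.ordered j hj
  case recpath =>
    intro r hr
    rw [hallD']
    rcases List.mem_append.mp hr with h | h
    · exact hI.recpath r h
    · simp only [List.mem_singleton] at h
      subst h
      exact hI.pp_mem
  case keynodup =>
    rw [List.map_append, List.nodup_append]
    refine ⟨hI.keynodup, by simp, ?_⟩
    intro x hx y hy
    have hy' : y = (pp, b) := by simpa using hy
    subst hy'
    exact fun he => hkeyb (he ▸ hx)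
  case seen_eq =>
    intro k
    simp only [List.mem_cons, hI.seen_eq k, List.map_append, List.mem_append, List.map_cons,
      List.map_nil, List.mem_singleton, pvKey]
    tauto
  case dirs_eq =>
    intro p
    rw [hD']
    exact hI.dirs_eq p
  case pp_mem =>
    rw [hallD']
    exact hI.pp_mem
  case len_eq =>
    simp only [pvSetChild, List.length_set, hD', hI.len_eq]
  case node_parent =>
    intro k hk
    rw [hallD'] at hk ⊢
    have hfst : ((pvSetChild nodes ((pvAllD R).idxOf pp) b (.file v)).getD k pvDfltNode).1 =
        (nodes.getD k pvDfltNode).1 := by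
      by_cases hki : k = (pvAllD R).idxOf pp
      · subst hki
        rw [pvSetChild, pv_getD_set_self _ _ (by omega)]
      · rw [pvSetChild, pv_getD_set_ne _ _ _ hki]
    rw [hfst]
    exact hI.node_parent k hk
  case node_items =>
    intro k hk
    rw [hallD'] at hk ⊢
    by_cases hki : k = (pvAllD R).idxOf pp
    · subst hki
      rw [pv_getD_idx hI, hitems_pp]
      rw [pvSetChild, pv_getD_set_self _ _ (by omega)]
      simp only
      rw [pv_dict_insert_fresh' _ _ hbfresh]
      rw [hI.node_items _ hi, pv_getD_idx hI]
    · have hne : (pvAllD R).getD k [] ≠ pp := by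
        intro he
        apply hki
        rw [← he, List.getD_eq_getElem _ _ hk]
        exact (hI.nodup.idxOf_getElem _ _).symm
      rw [hitems_stab _ hne, pvSetChild, pv_getD_set_ne _ _ _ hki]
      exact hI.node_items k hk
  case cur_eq =>
    rw [hallD']
    exact hI.cur_eq
  case sizes_eq =>
    have hsub : ∀ q ∈ pvPrefixes pp, q ∈ pvAllD R := by
      intro q hq
      exact hclosed pp hI.pp_mem q ((pv_mem_prefixes pp q).mp hq)
    rw [pv_dict_bump v (pvPrefixes pp) (pvAllD R) (pvFSum R) sizes (pv_prefixes_nodup pp)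
      hsub hI.nodup hI.sizes_eq]
    rw [hallD']
    apply List.map_congr_left
    intro p _
    rw [pv_fsum_append]
    simp only [pv_mem_prefixes]

-- the one-line preservation lemma
theorem pv_step_inv {R nodes cur pp seen dirs sizes} (hI : PvInv R nodes cur pp seen dirs sizes)
    (line : String) {pr' : List String × List (List String × String) × List (List String)}
    (hP : pvPreStep (some (pp, seen, dirs)) line = some pr') :
    ∃ R' nodes' cur' sizes',
      pvStepA (some (nodes, cur)) line = some (nodes', cur') ∧
      pvStepB (some (pp, sizes)) line = some (pr'.1, sizes') ∧
      PvInv R' nodes' cur' pr'.1 pr'.2.1 pr'.2.2 sizes' := by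
  have hcur := hI.cur_eq
  subst hcur
  rcases htoks : PySem.Str.split? line " " with _ | toks
  · simp [pvPreStep, htoks] at hP
  rcases toks with _ | ⟨a, _ | ⟨b, _ | ⟨c, _ | ⟨d, rest⟩⟩⟩⟩
  · -- no tokens: impossible (split? never returns [])
    simp only [pvPreStep, htoks, Option.some.injEq] at hP
    subst hP
    exact ⟨R, nodes, _, sizes, by simp [pvStepA, htoks], by simp [pvStepB, htoks], hI⟩
  · -- one token: ignored
    simp only [pvPreStep, htoks, Option.some.injEq] at hP
    subst hP
    exact ⟨R, nodes, _, sizes, by simp [pvStepA, htoks], by simp [pvStepB, htoks], hI⟩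
  · -- two tokens
    simp only [pvPreStep, htoks] at hP
    by_cases hls : a = "$" ∧ b = "ls"
    · rw [if_pos hls, Option.some.injEq] at hP
      subst hP
      exact ⟨R, nodes, _, sizes, by simp [pvStepA, htoks, hls],
        by simp [pvStepB, htoks, hls], hI⟩
    · rw [if_neg hls] at hP
      by_cases hsn : (pp, b) ∈ seen
      · rw [if_pos hsn] at hP
        simp at hP
      · rw [if_neg hsn] at hP
        by_cases hdir : a = "dir"
        · rw [if_pos hdir, Option.some.injEq] at hP
          subst hP
          refine ⟨R ++ [(pp, b, none)],
            pvSetChild nodes ((pvAllD R).idxOf pp) b (.dir nodes.length) ++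
              [(some ((pvAllD R).idxOf pp), PySem.Dict.mk [])],
            .dir ((pvAllD R).idxOf pp), sizes.insert (pp ++ [b]) 0, ?_, ?_, ?_⟩
          · simp [pvStepA, htoks, hls, hdir]
          · simp [pvStepB, htoks, hls, hdir]
          · exact pv_inv_dir hI b hsn
        · rw [if_neg hdir] at hP
          rcases hint : PySem.Int.ofStr? a with _ | v
          · rw [hint] at hP
            simp at hP
          · rw [hint] at hP
            simp only [Option.isSome_some, if_pos, Option.some.injEq] at hP
            subst hP
            refine ⟨R ++ [(pp, b, some v)],
              pvSetChild nodes ((pvAllD R).idxOf pp) b (.file v),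
              .dir ((pvAllD R).idxOf pp),
              (pvPrefixes pp).foldl (fun d q => d.insert q (d.getD q 0 + v)) sizes, ?_, ?_, ?_⟩
            · simp [pvStepA, htoks, hls, hdir, hint]
            · simp only [pvStepB, htoks, hls, hdir, hint, if_neg, and_false]
              rw [pv_foldB_range]
              simp
            · exact pv_inv_file hI b v hsn
  · -- three tokens
    simp only [pvPreStep, htoks] at hP
    by_cases hcd : a = "$" ∧ b = "cd"
    · rw [if_pos hcd] at hP
      by_cases hc1 : c = "/"
      · rw [if_pos hc1, Option.some.injEq] at hP
        subst hP
        refine ⟨R, nodes, .dir 0, sizes, ?_, ?_, ?_⟩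
        · simp [pvStepA, htoks, hcd, hc1]
        · simp [pvStepB, htoks, hcd, hc1]
        · exact pv_inv_cdroot hI
      · rw [if_neg hc1] at hP
        by_cases hc2 : c = ".."
        · rw [if_pos hc2] at hP
          rcases pp with _ | ⟨x, xs⟩
          · simp at hP
          · rw [Option.some.injEq] at hP
            subst hP
            refine ⟨R, nodes, .dir ((pvAllD R).idxOf (x :: xs).dropLast), sizes, ?_, ?_, ?_⟩
            · simp only [pvStepA, htoks]
              rw [if_pos hcd, if_neg hc1, if_pos hc2]
              rw [pv_parent_some hI (by simp)]
            · simp only [pvStepB, htoks]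
              rw [if_pos hcd, if_neg hc1, if_pos hc2]
            · exact pv_inv_cdup hI
        · rw [if_neg hc2] at hP
          by_cases hmemd : (pp ++ [c]) ∈ dirs
          · rw [if_pos hmemd, Option.some.injEq] at hP
            subst hP
            have hcD : pp ++ [c] ∈ pvD R := (hI.dirs_eq _).mp hmemd
            refine ⟨R, nodes, .dir ((pvAllD R).idxOf (pp ++ [c])), sizes, ?_, ?_, ?_⟩
            · simp only [pvStepA, htoks]
              rw [if_pos hcd, if_neg hc1, if_neg hc2]
              rw [pv_get_child hI c hcD]
            · simp only [pvStepB, htoks]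
              rw [if_pos hcd, if_neg hc1, if_neg hc2]
            · exact pv_inv_cdname hI c hcD
          · rw [if_neg hmemd] at hP
            simp at hP
    · rw [if_neg hcd, Option.some.injEq] at hP
      subst hP
      exact ⟨R, nodes, _, sizes, by simp [pvStepA, htoks, hcd], by simp [pvStepB, htoks, hcd], hI⟩
  · -- four or more tokens: ignored
    simp only [pvPreStep, htoks, Option.some.injEq] at hP
    subst hP
    exact ⟨R, nodes, _, sizes, by simp [pvStepA, htoks], by simp [pvStepB, htoks], hI⟩

-- folding the invariant over all lines
theorem pv_fold_inv (lines : List String) :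
    ∀ R nodes cur pp seen dirs sizes, PvInv R nodes cur pp seen dirs sizes →
    ∀ pr', lines.foldl pvPreStep (some (pp, seen, dirs)) = some pr' →
    ∃ R' nodes' cur' sizes',
      lines.foldl pvStepA (some (nodes, cur)) = some (nodes', cur') ∧
      lines.foldl pvStepB (some (pp, sizes)) = some (pr'.1, sizes') ∧
      PvInv R' nodes' cur' pr'.1 pr'.2.1 pr'.2.2 sizes' := by
  induction lines with
  | nil =>
    intro R nodes cur pp seen dirs sizes hI pr' hfold
    simp only [List.foldl_nil, Option.some.injEq] at hfold
    subst hfold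
    exact ⟨R, nodes, cur, sizes, rfl, rfl, hI⟩
  | cons l t ih =>
    intro R nodes cur pp seen dirs sizes hI pr' hfold
    simp only [List.foldl_cons] at hfold ⊢
    rcases hstep : pvPreStep (some (pp, seen, dirs)) l with _ | pr1
    · rw [hstep, pv_foldPre_none] at hfold; exact absurd hfold (by simp)
    · rw [hstep] at hfold
      obtain ⟨R1, nodes1, cur1, sizes1, hA, hB, hI1⟩ := pv_step_inv hI l hstep
      obtain ⟨R', nodes', cur', sizes', hA', hB', hI'⟩ :=
        ih R1 nodes1 cur1 pr1.1 pr1.2.1 pr1.2.2 sizes1 hI1 pr' hfold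
      exact ⟨R', nodes', cur', sizes', by rw [hA]; exact hA', by rw [hB]; exact hB', hI'⟩

-- the paths of the subdirectories declared directly inside p
def pvC (R : List PvRec) (p : List String) : List (List String) :=
  (R.filter (fun r => decide (r.1 = p) && r.2.2.isNone)).map (fun r => p ++ [r.2.1])

theorem pv_C_shape {R p} : ∀ q ∈ pvC R p, ∃ nm, q = p ++ [nm] := by
  intro q hq
  simp only [pvC, List.mem_map] at hq
  obtain ⟨r, _, rfl⟩ := hq
  exact ⟨r.2.1, rfl⟩

theorem pv_C_nodup {R : List PvRec} (hkey : (R.map pvKey).Nodup) (p : List String) :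
    (pvC R p).Nodup := by
  have hsub : ((R.filter (fun r => decide (r.1 = p) && r.2.2.isNone)).map pvKey).Sublist (R.map pvKey) :=
    List.Sublist.map pvKey List.filter_sublist
  have hnd : ((R.filter (fun r => decide (r.1 = p) && r.2.2.isNone)).map pvKey).Nodup :=
    hkey.sublist hsub
  have hrw : pvC R p = ((R.filter (fun r => decide (r.1 = p) && r.2.2.isNone)).map pvKey).map
      (fun k => p ++ [k.2]) := by
    simp [pvC, List.map_map, pvKey]
  rw [hrw]
  apply hnd.map_on
  intro x hx y hy hxy
  simp only [List.mem_map, List.mem_filter] at hx hy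
  obtain ⟨r, ⟨_, hr⟩, rfl⟩ := hx
  obtain ⟨r', ⟨_, hr'⟩, rfl⟩ := hy
  simp only [Bool.and_eq_true, decide_eq_true_eq] at hr hr'
  simp only [List.append_cancel_left_eq, List.cons.injEq, and_true] at hxy
  simp only [pvKey, Prod.mk.injEq]
  exact ⟨hr.1.trans hr'.1.symm, hxy⟩

-- every element of pvC R p strictly extends p
theorem pv_C_prefix {R p} : ∀ q ∈ pvC R p, p <+: q ∧ q ≠ p := by
  intro q hq
  obtain ⟨nm, rfl⟩ := pv_C_shape q hq
  constructor
  · exact ⟨[nm], rfl⟩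
  · intro h
    have := congrArg List.length h
    simp at this

-- the unique pvC element under a path strictly below p
theorem pv_C_unique {R : List PvRec} (hclosed : ∀ p' ∈ pvAllD R, ∀ q, q <+: p' → q ∈ pvAllD R)
    (p w : List String) (hw : w ∈ pvAllD R) (hpw : p <+: w) (hne : w ≠ p) :
    w.take (p.length + 1) ∈ pvC R p ∧
    ∀ q ∈ pvC R p, (q <+: w ↔ q = w.take (p.length + 1)) := by
  have hlen : p.length < w.length := by
    rcases Nat.lt_or_ge p.length w.length with h | h
    · exact h
    · exact absurd (List.IsPrefix.eq_of_length hpw (Nat.le_antisymm hpw.length_le h)).symm hne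
  have hq0len : (w.take (p.length + 1)).length = p.length + 1 := by
    simp [List.length_take]; omega
  have hq0pre : w.take (p.length + 1) <+: w := List.take_prefix _ _
  have hq0mem : w.take (p.length + 1) ∈ pvAllD R := hclosed w hw _ hq0pre
  have hq0drop : (w.take (p.length + 1)).dropLast = p := by
    have h1 : (w.take (p.length + 1)).dropLast = w.take p.length := by
      rw [List.dropLast_eq_take, hq0len, List.take_take]
      simp
    rw [h1, ← List.prefix_iff_eq_take.mp hpw]
  have hq0ne : w.take (p.length + 1) ≠ [] := by
    intro h
    rw [h] at hq0len
    simp at hq0len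
  have hq0C : w.take (p.length + 1) ∈ pvC R p := by
    rcases List.mem_cons.mp hq0mem with h | h
    · exact absurd h hq0ne
    · simp only [pvD, List.mem_filterMap] at h
      obtain ⟨r, hrR, hr⟩ := h
      rcases hval : r.2.2 with _ | v
      · rw [hval] at hr
        simp only [Option.some.injEq] at hr
        have hr1 : r.1 = p := by
          have := congrArg List.dropLast hr
          simpa [hq0drop] using this
        simp only [pvC, List.mem_map]
        refine ⟨r, List.mem_filter.mpr ⟨hrR, by simp [hr1, hval]⟩, ?_⟩
        rw [hr1] at hr; exact hr
      · rw [hval] at hr; simp at hr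
  refine ⟨hq0C, fun q hq => ⟨fun hqw => ?_, fun h => h ▸ hq0pre⟩⟩
  obtain ⟨nm, rfl⟩ := pv_C_shape q hq
  have hqlen : (p ++ [nm]).length = (w.take (p.length + 1)).length := by simp [hq0len]
  rcases List.prefix_or_prefix_of_prefix hqw hq0pre with h | h
  · exact List.IsPrefix.eq_of_length h (by omega)
  · exact (List.IsPrefix.eq_of_length h (by simp at hqlen ⊢; omega)).symm

-- flatMap of filters when the head survives in no branch
theorem pv_flatMap_filter_none {α : Type} (x : α) (X' : List α)
    (pred : List String → α → Bool) (C : List (List String))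
    (h : ∀ q ∈ C, pred q x = false) :
    C.flatMap (fun q => (x :: X').filter (fun y => pred q y)) =
      C.flatMap (fun q => X'.filter (fun y => pred q y)) := by
  induction C with
  | nil => rfl
  | cons c C' ih =>
    rw [List.flatMap_cons, List.flatMap_cons]
    congr 1
    · rw [List.filter_cons, h c List.mem_cons_self]
      simp
    · exact ih (fun q hq => h q (List.mem_cons_of_mem _ hq))

-- flatMap of filters when the head survives in exactly one branch
theorem pv_flatMap_filter_one {α : Type} (x : α) (X' : List α)
    (pred : List String → α → Bool) (C : List (List String)) (q0 : List String)
    (hq0 : q0 ∈ C) (hnd : C.Nodup) (hiff : ∀ q ∈ C, pred q x = true ↔ q = q0) :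
    (C.flatMap (fun q => (x :: X').filter (fun y => pred q y))).Perm
      (x :: C.flatMap (fun q => X'.filter (fun y => pred q y))) := by
  induction C with
  | nil => simp at hq0
  | cons c C' ih =>
    rcases List.mem_cons.mp hq0 with rfl | hq0'
    · have hpc : pred q0 x = true := (hiff q0 List.mem_cons_self).mpr rfl
      have hrest : ∀ q ∈ C', pred q x = false := by
        intro q hq
        cases hb : pred q x
        · rfl
        · exfalso
          have := (hiff q (List.mem_cons_of_mem _ hq)).mp hb
          subst this
          exact (List.nodup_cons.mp hnd).1 hq
      rw [List.flatMap_cons, List.flatMap_cons,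
        pv_flatMap_filter_none x X' pred C' hrest, List.filter_cons, hpc]
      simp
    · have hpc : pred c x = false := by
        cases hb : pred c x
        · rfl
        · exfalso
          have := (hiff c List.mem_cons_self).mp hb
          subst this
          exact (List.nodup_cons.mp hnd).1 hq0'
      rw [List.flatMap_cons, List.flatMap_cons, List.filter_cons, hpc]
      simp only [Bool.false_eq_true, if_false]
      have hstep := ih hq0' (List.nodup_cons.mp hnd).2
        (fun q hq => hiff q (List.mem_cons_of_mem _ hq))
      exact (hstep.append_left _).trans List.perm_middle

-- the partition of everything below p: p itself plus everything below each declared child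
theorem pv_partition {α : Type} {R : List PvRec}
    (hclosed : ∀ p' ∈ pvAllD R, ∀ q, q <+: p' → q ∈ pvAllD R)
    (hkey : (R.map pvKey).Nodup) (p : List String)
    (X : List α) (π : α → List String) (hX : ∀ x ∈ X, π x ∈ pvAllD R) :
    (X.filter (fun x => decide (p <+: π x))).Perm
      ((X.filter (fun x => decide (π x = p))) ++
        (pvC R p).flatMap (fun q => X.filter (fun x => decide (q <+: π x)))) := by
  induction X with
  | nil => simp
  | cons x X' ih =>
    have hX' : ∀ y ∈ X', π y ∈ pvAllD R := fun y hy => hX y (List.mem_cons_of_mem _ hy)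
    have ih' := ih hX'
    by_cases hpre : p <+: π x
    · have e1 : (x :: X').filter (fun y => decide (p <+: π y)) =
          x :: X'.filter (fun y => decide (p <+: π y)) := by
        rw [List.filter_cons]; simp [hpre]
      by_cases heq : π x = p
      · have h1 : ∀ q ∈ pvC R p, decide (q <+: π x) = false := by
          intro q hq
          simp only [decide_eq_false_iff_not]
          intro hqx
          obtain ⟨nm, rfl⟩ := pv_C_shape q hq
          have := hqx.length_le
          rw [heq] at this
          simp at this
        have e2 : (x :: X').filter (fun y => decide (π y = p)) =
            x :: X'.filter (fun y => decide (π y = p)) := by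
          rw [List.filter_cons]; simp [heq]
        rw [e1, e2, pv_flatMap_filter_none x X' (fun q y => decide (q <+: π y)) (pvC R p) h1,
          List.cons_append]
        exact ih'.cons x
      · obtain ⟨hq0C, huniq⟩ := pv_C_unique hclosed p (π x) (hX x List.mem_cons_self) hpre heq
        have hperm := pv_flatMap_filter_one x X' (fun q y => decide (q <+: π y)) (pvC R p)
          ((π x).take (p.length + 1)) hq0C (pv_C_nodup hkey p)
          (fun q hq => by simpa using huniq q hq)
        have e2 : (x :: X').filter (fun y => decide (π y = p)) =
            X'.filter (fun y => decide (π y = p)) := by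
          rw [List.filter_cons]; simp [heq]
        rw [e1, e2]
        have h2 : ((X'.filter (fun y => decide (π y = p))) ++
            (pvC R p).flatMap (fun q => (x :: X').filter (fun y => decide (q <+: π y)))).Perm
            (x :: ((X'.filter (fun y => decide (π y = p))) ++
              (pvC R p).flatMap (fun q => X'.filter (fun y => decide (q <+: π y))))) :=
          (hperm.append_left _).trans List.perm_middle
        exact (ih'.cons x).trans h2.symm
    · have h0 : ∀ q ∈ pvC R p, decide (q <+: π x) = false := by
        intro q hq
        simp only [decide_eq_false_iff_not]
        intro hqx
        exact hpre (((pv_C_prefix q hq).1).trans hqx)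
      have hne : π x ≠ p := fun h => hpre (h ▸ List.prefix_refl p)
      have e1 : (x :: X').filter (fun y => decide (p <+: π y)) =
          X'.filter (fun y => decide (p <+: π y)) := by
        rw [List.filter_cons]; simp [hpre]
      have e2 : (x :: X').filter (fun y => decide (π y = p)) =
          X'.filter (fun y => decide (π y = p)) := by
        rw [List.filter_cons]; simp [hne]
      rw [e1, e2, pv_flatMap_filter_none x X' (fun q y => decide (q <+: π y)) (pvC R p) h0]
      exact ih'


theorem pv_filter_and_comm {α : Type} (l : List α) (p q : α → Bool) :
    l.filter (fun a => p a && q a) = l.filter (fun a => q a && p a) :=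
  List.filter_congr (fun x _ => Bool.and_comm _ _)

theorem pv_sum_flatMap {α : Type} (l : List α) (f : α → List Int) :
    (l.flatMap f).sum = (l.map (fun a => (f a).sum)).sum := by
  induction l with
  | nil => rfl
  | cons a t ih => simp [List.flatMap_cons, List.sum_append, ih]

theorem pv_sum_filter {α : Type} (l : List α) (p : α → Bool) (f : α → Int) :
    ((l.filter p).map f).sum = (l.map (fun x => if p x = true then f x else 0)).sum := by
  induction l with
  | nil => rfl
  | cons a t ih =>
    rw [List.filter_cons]
    cases h : p a <;> simp [h, ih]

theorem pv_filterMap_filter {α β : Type} (l : List α) (p : α → Bool) (g : α → β) :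
    l.filterMap (fun x => if p x = true then some (g x) else none) = (l.filter p).map g := by
  induction l with
  | nil => rfl
  | cons a t ih =>
    rw [List.filterMap_cons, List.filter_cons]
    cases h : p a <;> simp [h, ih]

theorem pv_filter_eq_singleton {α : Type} [DecidableEq α] (l : List α) (h : l.Nodup) (a : α)
    (ha : a ∈ l) : l.filter (fun x => decide (x = a)) = [a] := by
  induction l with
  | nil => simp at ha
  | cons c t ih =>
    rw [List.filter_cons]
    rcases List.mem_cons.mp ha with rfl | hat
    · have hnil : t.filter (fun x => decide (x = a)) = [] := by
        apply List.filter_eq_nil_iff.mpr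
        intro x hx
        simp only [decide_eq_true_eq]
        intro hxc
        exact (List.nodup_cons.mp h).1 (hxc ▸ hx)
      simp [hnil]
    · have hca : c ≠ a := by
        intro hca
        exact (List.nodup_cons.mp h).1 (hca ▸ hat)
      simp only [hca, decide_false, Bool.false_eq_true, if_false]
      exact ih (List.nodup_cons.mp h).2 hat

-- the size of the directory p is its direct files plus the sizes of its declared children
theorem pv_fsum_eq {R : List PvRec}
    (hclosed : ∀ p' ∈ pvAllD R, ∀ q, q <+: p' → q ∈ pvAllD R)
    (hkey : (R.map pvKey).Nodup)
    (hrec : ∀ r ∈ R, r.1 ∈ pvAllD R) (p : List String) :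
    pvFSum R p = ((R.filter (fun r => decide (r.1 = p))).map
      (fun r => match r.2.2 with | some v => v | none => pvFSum R (p ++ [r.2.1]))).sum := by
  have hXmem : ∀ x ∈ R.filter (fun r => r.2.2.isSome), x.1 ∈ pvAllD R :=
    fun x hx => hrec x (List.mem_filter.mp hx).1
  have hpart := pv_partition hclosed hkey p (R.filter (fun r => r.2.2.isSome))
    (fun r => r.1) hXmem
  have hsum := (hpart.map (fun r : PvRec => r.2.2.getD 0)).sum_eq
  -- rewrite the double filters into single ones
  have hXf : ∀ (w : List String), (R.filter (fun r => r.2.2.isSome)).filter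
      (fun r => decide (w <+: r.1)) = R.filter (fun r => r.2.2.isSome && decide (w <+: r.1)) := by
    intro w
    rw [List.filter_filter]
    exact pv_filter_and_comm _ _ _
  have hXe : (R.filter (fun r => r.2.2.isSome)).filter (fun r => decide (r.1 = p)) =
      (R.filter (fun r => decide (r.1 = p))).filter (fun r => r.2.2.isSome) := by
    rw [List.filter_filter, List.filter_filter]
    exact pv_filter_and_comm _ _ _
  have hL : pvFSum R p = (((R.filter (fun r => r.2.2.isSome)).filter
      (fun r => decide (p <+: r.1))).map (fun r : PvRec => r.2.2.getD 0)).sum := by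
    rw [hXf]; rfl
  rw [hL, hsum, List.map_append, List.sum_append, List.map_flatMap, pv_sum_flatMap]
  -- the child sums are the pvFSum of the children
  have hchild : ((pvC R p).map (fun q => (((R.filter (fun r => r.2.2.isSome)).filter
      (fun r => decide (q <+: r.1))).map (fun r : PvRec => r.2.2.getD 0)).sum)) =
      (pvC R p).map (pvFSum R) := by
    apply List.map_congr_left
    intro q _
    rw [hXf]; rfl
  rw [hchild]
  -- now decompose the right-hand sum over the records listed directly in p
  have hdecomp : (fun r : PvRec => match r.2.2 with
      | some v => v | none => pvFSum R (p ++ [r.2.1])) =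
      fun r : PvRec => (if r.2.2.isSome = true then r.2.2.getD 0 else 0) +
        (if r.2.2.isNone = true then pvFSum R (p ++ [r.2.1]) else 0) := by
    funext r
    rcases r.2.2 with _ | v <;> simp
  rw [hdecomp, PySem.List.sum_map_add_int]
  have e1 : (((R.filter (fun r => r.2.2.isSome)).filter (fun r => decide (r.1 = p))).map
      (fun r : PvRec => r.2.2.getD 0)).sum =
      ((R.filter (fun r => decide (r.1 = p))).map
        (fun x : PvRec => if x.2.2.isSome = true then x.2.2.getD 0 else 0)).sum := by
    rw [hXe]
    exact pv_sum_filter _ _ _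
  have e2 : ((pvC R p).map (pvFSum R)).sum =
      ((R.filter (fun r => decide (r.1 = p))).map
        (fun x : PvRec => if x.2.2.isNone = true then pvFSum R (p ++ [x.2.1]) else 0)).sum := by
    have h1 : (R.filter (fun r => decide (r.1 = p))).filter (fun r => r.2.2.isNone) =
        R.filter (fun r => decide (r.1 = p) && r.2.2.isNone) := by
      rw [List.filter_filter]
      exact pv_filter_and_comm _ _ _
    calc ((pvC R p).map (pvFSum R)).sum
        = (((R.filter (fun r => decide (r.1 = p))).filter (fun r => r.2.2.isNone)).map
            (fun r : PvRec => pvFSum R (p ++ [r.2.1]))).sum := by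
          rw [h1]
          simp only [pvC, List.map_map]
          rfl
      _ = _ := pv_sum_filter _ _ _
  rw [e1, e2]

-- everything below p is p itself plus everything below each declared child of p
theorem pv_dirlist_perm {R : List PvRec}
    (hclosed : ∀ p' ∈ pvAllD R, ∀ q, q <+: p' → q ∈ pvAllD R)
    (hkey : (R.map pvKey).Nodup) (hnodup : (pvAllD R).Nodup)
    (p : List String) (hp : p ∈ pvAllD R) :
    ((pvAllD R).filter (fun q => decide (p <+: q))).Perm
      (p :: (pvC R p).flatMap (fun q' => (pvAllD R).filter (fun q => decide (q' <+: q)))) := by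
  have := pv_partition hclosed hkey p (pvAllD R) (fun q => q) (fun x hx => hx)
  rw [pv_filter_eq_singleton (pvAllD R) hnodup p hp] at this
  exact this

-- A's recursive size computation, characterised on an invariant-shaped arena
theorem pv_calc_spec {R nodes cur pp seen dirs sizes} (hI : PvInv R nodes cur pp seen dirs sizes) :
    ∀ k, k < (pvAllD R).length →
      (pvCalcDir nodes k).2 = pvFSum R ((pvAllD R).getD k []) ∧
      ((pvCalcDir nodes k).1).Perm
        (((pvAllD R).filter (fun q => decide ((pvAllD R).getD k [] <+: q))).map (pvFSum R)) := by
  have hclosed := pv_prefix_closed hI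
  have hkey := hI.keynodup
  have hnodup := hI.nodup
  have hlen : nodes.length = (pvAllD R).length := by
    simp [pvAllD, hI.len_eq]
  have haux : ∀ (m k : Nat), k < (pvAllD R).length → nodes.length - k ≤ m →
      (pvCalcDir nodes k).2 = pvFSum R ((pvAllD R).getD k []) ∧
      ((pvCalcDir nodes k).1).Perm
        (((pvAllD R).filter (fun q => decide ((pvAllD R).getD k [] <+: q))).map (pvFSum R)) := by
    intro m
    induction m with
    | zero => intro k hk hm; omega
    | succ m ihm =>
      intro k hk hm
      have hpk : (pvAllD R).getD k [] = (pvAllD R)[k] := List.getD_eq_getElem _ _ hk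
      have hpmem : (pvAllD R).getD k [] ∈ pvAllD R := by
        rw [hpk]; exact List.getElem_mem hk
      have hidx : (pvAllD R).idxOf ((pvAllD R).getD k []) = k := by
        rw [hpk]; exact hnodup.idxOf_getElem _ _
      set p := (pvAllD R).getD k [] with hpdef
      have inner : ∀ recs : List PvRec, (∀ r ∈ recs, r ∈ R ∧ r.1 = p) →
          (pvCalcList nodes k (recs.map (pvEntOf R))).2 =
            (recs.map (fun r => match r.2.2 with
              | some v => v | none => pvFSum R (p ++ [r.2.1]))).sum ∧
          ((pvCalcList nodes k (recs.map (pvEntOf R))).1).Perm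
            ((recs.filterMap (fun r => if r.2.2.isNone = true then some (p ++ [r.2.1]) else none)).flatMap
              (fun q' => ((pvAllD R).filter (fun q => decide (q' <+: q))).map (pvFSum R))) := by
        intro recs
        induction recs with
        | nil => intro _; simp [pvCalcList]
        | cons r t iht =>
          intro hmem
          obtain ⟨hrR, hr1⟩ := hmem r List.mem_cons_self
          have ht := iht (fun r' hr' => hmem r' (List.mem_cons_of_mem _ hr'))
          rcases hval : r.2.2 with _ | v
          · -- subdirectory record
            have hqD : p ++ [r.2.1] ∈ pvD R := by
              simp only [pvD, List.mem_filterMap]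
              exact ⟨r, hrR, by rw [hval, hr1]⟩
            have hqmem : p ++ [r.2.1] ∈ pvAllD R := List.mem_cons_of_mem _ hqD
            have hjlt : (pvAllD R).idxOf (p ++ [r.2.1]) < (pvAllD R).length :=
              List.idxOf_lt_length_of_mem hqmem
            set j := (pvAllD R).idxOf (p ++ [r.2.1]) with hjdef
            have hkj : k < j := by
              rw [← hidx]
              exact pv_idx_lt hI p r.2.1 hqmem
            have hjq : (pvAllD R).getD j [] = p ++ [r.2.1] := by
              rw [List.getD_eq_getElem _ _ hjlt]
              exact List.getElem_idxOf hjlt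
            have hent : pvEntOf R r = .dir j := by
              simp [pvEntOf, hval, hr1, hjdef]
            obtain ⟨hcs, hcp⟩ := ihm j hjlt (by omega)
            rw [List.map_cons, hent]
            have hguard : k < j ∧ j < nodes.length := ⟨hkj, by omega⟩
            simp only [pvCalcList, hguard, and_self, dite_true]
            constructor
            · simp only [List.map_cons, List.sum_cons, hval]
              rw [hcs, hjq, ht.1]
            · rw [List.filterMap_cons]
              simp only [hval, Option.isNone_some, Option.isNone_none, if_true]
              rw [List.flatMap_cons]
              exact List.Perm.append (hjq ▸ hcp) ht.2
          · -- file record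
            have hent : pvEntOf R r = .file v := by simp [pvEntOf, hval]
            rw [List.map_cons, hent]
            simp only [pvCalcList]
            constructor
            · simp only [List.map_cons, List.sum_cons, hval]
              rw [ht.1]
            · rw [List.filterMap_cons]
              simp only [hval, Option.isNone_some, Bool.false_eq_true, if_false]
              exact ht.2
      -- assemble the directory node
      have hk' : k < (pvAllD R).length := hk
      have hitems := hI.node_items k hk'
      have hvalues : (nodes.getD k pvDfltNode).2.values = (R.filter (fun r => decide (r.1 = p))).map (pvEntOf R) := by
        simp only [PySem.Dict.values, hitems, pvItems, List.map_map]
        rfl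
      obtain ⟨hs, hl⟩ := inner (R.filter (fun r => decide (r.1 = p)))
        (fun r hr => ⟨(List.mem_filter.mp hr).1, by simpa using (List.mem_filter.mp hr).2⟩)
      have hCeq : (R.filter (fun r => decide (r.1 = p))).filterMap
          (fun r => if r.2.2.isNone = true then some (p ++ [r.2.1]) else none) = pvC R p := by
        rw [pv_filterMap_filter]
        have : (R.filter (fun r => decide (r.1 = p))).filter (fun r => r.2.2.isNone) =
            R.filter (fun r => decide (r.1 = p) && r.2.2.isNone) := by
          rw [List.filter_filter]
          exact pv_filter_and_comm _ _ _
        rw [this]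
        rfl
      rw [hCeq] at hl
      have hsum2 : (pvCalcDir nodes k).2 = pvFSum R p := by
        simp only [pvCalcDir]
        rw [hvalues, hs]
        exact (pv_fsum_eq hclosed hkey hI.recpath p).symm
      refine ⟨hsum2, ?_⟩
      have hlist : (pvCalcDir nodes k).1 =
          (pvCalcList nodes k ((R.filter (fun r => decide (r.1 = p))).map (pvEntOf R))).1 ++
            [(pvCalcList nodes k ((R.filter (fun r => decide (r.1 = p))).map (pvEntOf R))).2] := by
        simp only [pvCalcDir]
        rw [hvalues]
      rw [hlist, hs]
      rw [← pv_fsum_eq hclosed hkey hI.recpath p]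
      have hstep1 := List.perm_append_singleton (pvFSum R p)
        (pvCalcList nodes k ((R.filter (fun r => decide (r.1 = p))).map (pvEntOf R))).1
      refine hstep1.trans ?_
      have htarget := (pv_dirlist_perm hclosed hkey hnodup p hpmem).map (pvFSum R)
      rw [List.map_cons, List.map_flatMap] at htarget
      exact ((hl.cons (pvFSum R p)).trans htarget.symm)
  intro k hk
  exact haux nodes.length k hk (by omega)

-- extremum of a list depends only on its multiset
theorem pv_max_perm {xs ys : List Int} (h : xs.Perm ys) :
    PySem.List.max? xs (fun x => x) = PySem.List.max? ys (fun x => x) := by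
  rcases hx : PySem.List.max? xs (fun x => x) with _ | m1
  · have hnil : xs = [] := (PySem.List.max?_eq_none_iff xs _).mp hx
    subst hnil
    have : ys = [] := h.nil_eq.symm
    subst this; rfl
  · rcases hy : PySem.List.max? ys (fun x => x) with _ | m2
    · have : ys = [] := (PySem.List.max?_eq_none_iff ys _).mp hy
      subst this
      have : xs = [] := h.eq_nil
      subst this; simp [PySem.List.max?] at hx
    · have h1 : m1 ∈ ys := h.subset (PySem.List.max?_mem hx)
      have h2 : m2 ∈ xs := h.symm.subset (PySem.List.max?_mem hy)
      have := PySem.List.max?_isMax hx m2 h2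
      have := PySem.List.max?_isMax hy m1 h1
      simp only [Option.some.injEq]
      omega

theorem pv_min_perm {xs ys : List Int} (h : xs.Perm ys) :
    PySem.List.min? xs (fun x => x) = PySem.List.min? ys (fun x => x) := by
  rcases hx : PySem.List.min? xs (fun x => x) with _ | m1
  · have hnil : xs = [] := (PySem.List.min?_eq_none_iff xs _).mp hx
    subst hnil
    have : ys = [] := h.nil_eq.symm
    subst this; rfl
  · rcases hy : PySem.List.min? ys (fun x => x) with _ | m2
    · have : ys = [] := (PySem.List.min?_eq_none_iff ys _).mp hy
      subst this
      have : xs = [] := h.eq_nil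
      subst this; simp [PySem.List.min?] at hx
    · have h1 : m1 ∈ ys := h.subset (PySem.List.min?_mem hx)
      have h2 : m2 ∈ xs := h.symm.subset (PySem.List.min?_mem hy)
      have := PySem.List.min?_isMin hx m2 h2
      have := PySem.List.min?_isMin hy m1 h1
      simp only [Option.some.injEq]
      omega

-- the initial states satisfy the invariant
theorem pv_init_inv : PvInv [] [(none, PySem.Dict.mk [])] (.dir 0) [] [] []
    ((PySem.Dict.mk []).insert ([] : List String) 0) := by
  constructor
  · decide
  · intro j h; simp [pvD] at h
  · intro r h; simp at h
  · simp
  · intro k; simp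
  · intro p; simp [pvD]
  · simp [pvAllD]
  · simp [pvD]
  · intro k hk
    simp only [pvAllD, pvD, List.filterMap_nil, List.length_cons, List.length_nil] at hk
    interval_cases k <;> simp [pvDfltNode]
  · intro k hk
    simp only [pvAllD, pvD, List.filterMap_nil, List.length_cons, List.length_nil] at hk
    interval_cases k <;> simp [pvDfltNode, pvItems]
  · simp [pvAllD]
  · simp [PySem.Dict.insert, PySem.Dict.contains, pvAllD, pvD, pvFSum, PySem.Dict.items]

-- ===== VERDICT (by name: the statement is the Claim_ definition above) =====
theorem solve_spec : Claim_equal_solve := by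
  unfold Claim_equal_solve
  intro s _hDom hPre
  unfold Spec_solve
  unfold Pre_solve at hPre
  rcases hsplit : PySem.Str.split? s "
" with _ | lines
  · rw [hsplit] at hPre; simp at hPre
  · rw [hsplit] at hPre
    simp only [Option.isSome_iff_exists] at hPre
    obtain ⟨pr', hfold⟩ := hPre
    obtain ⟨R', nodes', cur', sizes', hA, hB, hI⟩ :=
      pv_fold_inv lines [] [(none, PySem.Dict.mk [])] (.dir 0) [] [] []
        ((PySem.Dict.mk []).insert ([] : List String) 0) pv_init_inv pr' hfold
    simp only [solve, solve_alt]
    rw [hsplit]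
    simp only [hA, hB]
    have hk0 : 0 < (pvAllD R').length := by simp [pvAllD]
    obtain ⟨hsum, hperm⟩ := pv_calc_spec hI 0 hk0
    have hall : ((pvAllD R').filter (fun q => decide ((pvAllD R').getD 0 [] <+: q))) = pvAllD R' := by
      apply List.filter_eq_self.mpr
      intro q _
      simp [pvAllD, List.nil_prefix]
    rw [hall] at hperm
    have hvals : sizes'.values = (pvAllD R').map (pvFSum R') := by
      simp only [PySem.Dict.values, hI.sizes_eq, List.map_map]
      rfl
    have hperm2 : ((pvCalcDir nodes' 0).1).Perm sizes'.values := by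
      rw [hvals]; exact hperm
    have hsums : ((pvCalcDir nodes' 0).1.filter (fun s => decide (s ≤ 100000))).sum =
        (sizes'.values.filter (fun s => decide (s ≤ 100000))).sum :=
      (hperm2.filter _).sum_eq
    rw [pv_max_perm hperm2, hsums]
    rcases hmax : PySem.List.max? sizes'.values (fun x => x) with _ | used
    · rfl
    · simp only [pv_min_perm (hperm2.filter (fun s => decide (30000000 - (70000000 - used) ≤ s)))]
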